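-- pv_equiv track=rewrite | github.com/Joshjayboy/Competitive_Programming | E_Hermosa_Matriz.py | create_beautiful_matrix
-- ===== SOURCE A (Python) =====
-- def create_beautiful_matrix(n):
--     matrix = [[0] * n for _ in range(n)]
--     current_number = 1
--     for i in range(n):
--         for j in range(n):
--             if (i + j) % 2 == 0:
--                 matrix[i][j] = current_number
--                 current_number += 1
--
--     for i in range(n):
--         for j in range(n):
--             if (i + j) % 2 != 0:
--                 matrix[i][j] = current_number
--                 current_number += 1
--
--     return matrix
-- ===== SOURCE B (Python) =====
-- def create_beautiful_matrix(n):
--     # Closed-form: value of cell (i, j) computed directly from i, j and n,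
--     # no mutation and no running counter.
--     def val(i, j):
--         if (i + j) % 2 == 0:
--             return (i * n + 1) // 2 + (j + 1 - i % 2) // 2 + 1
--         return (n * n + 1) // 2 + (i * n) // 2 + (j + i % 2) // 2 + 1
--     return [[val(i, j) for j in range(n)] for i in range(n)]
-- ===== Notes on version B (the rewrite author's own statement) =====
-- stated objective: alternative
-- what changed: Replaces A's zero-matrix allocation plus two full mutating scans with a single comprehension that computes each cell's value by a closed-form rank formula (evens-before / odds-before counts) instead of running counters.
import Mathlib
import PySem

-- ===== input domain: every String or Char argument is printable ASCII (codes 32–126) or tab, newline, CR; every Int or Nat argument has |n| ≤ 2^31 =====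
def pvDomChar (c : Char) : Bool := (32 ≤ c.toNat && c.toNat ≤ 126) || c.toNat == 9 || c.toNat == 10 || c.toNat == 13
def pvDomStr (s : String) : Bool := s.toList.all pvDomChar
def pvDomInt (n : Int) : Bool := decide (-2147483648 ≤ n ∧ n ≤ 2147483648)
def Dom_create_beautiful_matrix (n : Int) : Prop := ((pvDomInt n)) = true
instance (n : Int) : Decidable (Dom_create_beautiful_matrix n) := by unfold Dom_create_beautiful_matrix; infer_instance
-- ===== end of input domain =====

-- B replaces A's zero-matrix allocation and two mutating counter passes by a single
-- comprehension computing each cell from a closed-form rank formula (alternative decomposition).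


-- ===== PORT A =====
-- matrix[i][j] = v  for the in-range indices 0 ≤ i < len(matrix), 0 ≤ j produced by range(n): exact there
def pySet2 (m : List (List Int)) (i j v : Int) : List (List Int) :=
  m.set i.toNat ((m.getD i.toNat []).set j.toNat v)

def create_beautiful_matrix (n : Int) : List (List Int) :=
  -- matrix = [[0] * n for _ in range(n)]  ([0]*n is empty for n ≤ 0, like replicate n.toNat)
  let matrix := List.replicate n.toNat (List.replicate n.toNat (0 : Int))
  -- first pass: even-parity cells
  let s1 := (PySem.List.pyRange 0 n 1).foldl
    (fun st i => (PySem.List.pyRange 0 n 1).foldl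
      (fun (st : List (List Int) × Int) j =>
        if PySem.Int.mod (i + j) 2 == 0 then (pySet2 st.1 i j st.2, st.2 + 1) else st) st)
    (matrix, 1)
  -- second pass: odd-parity cells
  let s2 := (PySem.List.pyRange 0 n 1).foldl
    (fun st i => (PySem.List.pyRange 0 n 1).foldl
      (fun (st : List (List Int) × Int) j =>
        if !(PySem.Int.mod (i + j) 2 == 0) then (pySet2 st.1 i j st.2, st.2 + 1) else st) st)
    s1
  s2.1

-- ===== PORT B =====
-- Source B's local helper val(i, j): closed-form value of cell (i, j)
def pvVal (n i j : Int) : Int :=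
  if PySem.Int.mod (i + j) 2 == 0 then
    PySem.Int.floordiv (i * n + 1) 2 + PySem.Int.floordiv (j + 1 - PySem.Int.mod i 2) 2 + 1
  else
    PySem.Int.floordiv (n * n + 1) 2 + PySem.Int.floordiv (i * n) 2
      + PySem.Int.floordiv (j + PySem.Int.mod i 2) 2 + 1

def create_beautiful_matrix_alt (n : Int) : List (List Int) :=
  (PySem.List.pyRange 0 n 1).map (fun i => (PySem.List.pyRange 0 n 1).map (fun j => pvVal n i j))

-- ===== PRECONDITION & SPEC =====
def Spec_create_beautiful_matrix (n : Int) (out : List (List Int)) : Prop := out = create_beautiful_matrix_alt n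
instance (n : Int) (out : List (List Int)) : Decidable (Spec_create_beautiful_matrix n out) := by unfold Spec_create_beautiful_matrix; infer_instance

-- ===== CLAIM (what is proved, stated in full; the proofs are below) =====
def Claim_equal_create_beautiful_matrix : Prop := ∀ (n : Int), Dom_create_beautiful_matrix n → Spec_create_beautiful_matrix n (create_beautiful_matrix n)

-- ===== LEMMAS AND PROOFS =====

-- number of even-parity cells strictly before (i, j) in row-major order (rows of length n)
def ebf (n i j : Int) : Int := (i * n + 1) / 2 + (j + 1 - i % 2) / 2
-- number of odd-parity cells strictly before (i, j)
def obf (n i j : Int) : Int := (i * n) / 2 + (j + i % 2) / 2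

-- matrix-level loop body of one of A's passes (p = the parity test)
def mbody (p : Int → Int → Bool) (i : Int) : (List (List Int) × Int) → Int → (List (List Int) × Int) :=
  fun st j => if p i j then (pySet2 st.1 i j st.2, st.2 + 1) else st
-- the same body acting on the single row it touches
def rbody (p : Int → Int → Bool) (i : Int) : (List Int × Int) → Int → (List Int × Int) :=
  fun st j => if p i j then (st.1.set j.toNat st.2, st.2 + 1) else st

theorem set_map_range {α : Type} (m k : Nat) (g : Nat → α) (x : α) (hk : k < m) :
    ((List.range m).map g).set k x = (List.range m).map (fun r => if r = k then x else g r) := by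
  apply List.ext_getElem
  · simp
  · intro i h1 h2
    simp only [List.length_set, List.length_map, List.length_range] at h1
    by_cases hik : i = k
    · subst hik
      rw [List.getElem_set_self]
      simp
    · rw [List.getElem_set_ne (fun h => hik h.symm)]
      simp [hik]

theorem map_range_congr {α : Type} (m : Nat) (g h : Nat → α) (H : ∀ r, r < m → g r = h r) :
    (List.range m).map g = (List.range m).map h := by
  apply List.map_congr_left
  intro r hr
  exact H r (List.mem_range.mp hr)

theorem getD_set_self {α : Type} (M : List α) (k : Nat) (x d : α) (h : k < M.length) :
    (M.set k x).getD k d = x := by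
  rw [List.getD_eq_getElem?_getD, List.getElem?_set_self (by omega)]
  simp

theorem set_getD_self {α : Type} (M : List α) (k : Nat) (d : α) (h : k < M.length) :
    M.set k (M.getD k d) = M := by
  rw [List.getD_eq_getElem?_getD, List.getElem?_eq_getElem h]
  exact List.set_getElem_self h

-- the inner loop only touches row i: it is the row-level fold applied to that row
theorem inner_to_row (p : Int → Int → Bool) (i : Int) :
    ∀ (js : List Int) (M : List (List Int)) (c : Int), i.toNat < M.length →
      js.foldl (mbody p i) (M, c) =
        (M.set i.toNat (js.foldl (rbody p i) (M.getD i.toNat [], c)).1,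
         (js.foldl (rbody p i) (M.getD i.toNat [], c)).2) := by
  intro js
  induction js with
  | nil =>
    intro M c h
    simp only [List.foldl_nil]
    rw [set_getD_self M i.toNat [] h]
  | cons j rest ih =>
    intro M c h
    simp only [List.foldl_cons, mbody, rbody]
    by_cases hp : p i j
    · simp only [hp, if_pos]
      rw [ih (pySet2 M i j c) (c + 1) (by simpa [pySet2] using h)]
      simp only [pySet2, getD_set_self _ _ _ _ h, List.set_set]
    · simp only [hp, if_neg, Bool.false_eq_true, not_false_iff]
      exact ih M c h

-- one row of a pass: the counter stays base + cb i · and each selected cell gets its value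
theorem row_pass (p : Int → Int → Bool) (cb : Int → Int → Int)
    (h1 : ∀ i j, 0 ≤ i → 0 ≤ j → cb i (j + 1) = cb i j + (if p i j then 1 else 0))
    (m : Nat) (i : Int) (hi : 0 ≤ i) (f : Nat → Int) (base : Int) :
    ∀ t : Nat, t ≤ m →
      (PySem.List.pyRange 0 (t : Int) 1).foldl (rbody p i) ((List.range m).map (fun j => f j), base + cb i 0) =
        ((List.range m).map (fun (j : Nat) => if j < t ∧ p i (↑j) then base + cb i (↑j) else f j),
         base + cb i (t : Int)) := by
  intro t
  induction t with
  | zero =>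
    simp only [Nat.cast_zero, PySem.List.pyRange_one_eq_nil (le_refl (0 : Int)), List.foldl_nil,
      Prod.mk.injEq]
    intro _
    exact ⟨(map_range_congr m _ _ fun r hr => by simp).symm, trivial⟩
  | succ t ih =>
    intro ht
    have ht' : t ≤ m := by omega
    have hc : ((t + 1 : Nat) : Int) = (t : Int) + 1 := by push_cast; ring
    rw [hc, PySem.List.pyRange_one_succ_right (by positivity), List.foldl_append, ih ht']
    simp only [List.foldl_cons, List.foldl_nil, rbody]
    by_cases hp : p i (t : Int)
    · simp only [hp, if_pos, Prod.mk.injEq]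
      refine ⟨?_, ?_⟩
      · rw [show ((t : Int)).toNat = t by simp]
        rw [set_map_range m t _ _ (by omega)]
        apply map_range_congr
        intro r hr
        by_cases hrt : r = t
        · subst hrt; simp [hp]
        · by_cases hlt : r < t
          · have h1' : r < t + 1 := by omega
            simp [hrt, hlt, h1']
          · have h2' : ¬ r < t + 1 := by omega
            simp [hrt, hlt, h2']
      · rw [h1 i (t : Int) hi (by positivity), if_pos hp]; ring
    · simp only [hp, if_neg, Bool.false_eq_true, not_false_iff, Prod.mk.injEq]
      refine ⟨?_, ?_⟩
      · apply map_range_congr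
        intro r hr
        by_cases hrt : r = t
        · subst hrt; simp [hp]
        · by_cases hlt : r < t
          · have h1' : r < t + 1 := by omega
            simp [hlt, h1']
          · have h2' : ¬ r < t + 1 := by omega
            simp [hlt, h2']
      · rw [h1 i (t : Int) hi (by positivity), if_neg (by simp [hp])]; ring

-- a whole pass over the matrix
theorem outer_pass (p : Int → Int → Bool) (cb : Int → Int → Int) (m : Nat)
    (h0 : cb 0 0 = 0)
    (h1 : ∀ i j, 0 ≤ i → 0 ≤ j → cb i (j + 1) = cb i j + (if p i j then 1 else 0))
    (h2 : ∀ i, 0 ≤ i → cb (i + 1) 0 = cb i (m : Int)) :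
    ∀ t : Nat, t ≤ m → ∀ (g : Nat → Nat → Int) (base : Int),
      (PySem.List.pyRange 0 (t : Int) 1).foldl
          (fun st i => (PySem.List.pyRange 0 (m : Int) 1).foldl (mbody p i) st)
          ((List.range m).map (fun r => (List.range m).map (fun j => g r j)), base) =
        ((List.range m).map (fun (r : Nat) => (List.range m).map
            (fun (j : Nat) => if r < t ∧ p (↑r) (↑j) then base + cb (↑r) (↑j) else g r j)),
         base + cb (t : Int) 0) := by
  intro t
  induction t with
  | zero =>
    intro _ g base
    simp only [Nat.cast_zero, PySem.List.pyRange_one_eq_nil (le_refl (0 : Int)), List.foldl_nil,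
      Prod.mk.injEq, h0, add_zero]
    refine ⟨?_, trivial⟩
    apply map_range_congr
    intro r hr
    apply map_range_congr
    intro j hj
    simp
  | succ t ih =>
    intro ht g base
    have ht' : t ≤ m := by omega
    have hc : ((t + 1 : Nat) : Int) = (t : Int) + 1 := by push_cast; ring
    rw [hc, PySem.List.pyRange_one_succ_right (by positivity), List.foldl_append, ih ht' g base]
    simp only [List.foldl_cons, List.foldl_nil]
    rw [inner_to_row p (t : Int) _ _ _
      (by simp only [List.length_map, List.length_range, Int.toNat_natCast]; omega)]
    have hrow : ((List.range m).map (fun (r : Nat) => (List.range m).map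
        (fun (j : Nat) => if r < t ∧ p (↑r) (↑j) then base + cb (↑r) (↑j) else g r j))).getD
          ((t : Int)).toNat []
        = (List.range m).map (fun j => g t j) := by
      rw [show ((t : Int)).toNat = t by simp, PySem.List.getD_map_range _ m t _ (by omega)]
      apply map_range_congr
      intro j hj
      simp
    rw [hrow, row_pass p cb h1 m (t : Int) (by positivity) (fun j => g t j) base m (le_refl m)]
    simp only [Prod.mk.injEq]
    refine ⟨?_, ?_⟩
    · rw [show ((t : Int)).toNat = t by simp, set_map_range m t _ _ (by omega)]
      apply map_range_congr
      intro r hr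
      by_cases hrt : r = t
      · subst hrt
        rw [if_pos rfl]
        apply map_range_congr
        intro j hj
        have h1' : r < r + 1 := by omega
        simp [hj, h1']
      · rw [if_neg hrt]
        apply map_range_congr
        intro j hj
        by_cases hlt : r < t
        · have h1' : r < t + 1 := by omega
          simp [hlt, h1']
        · have h2' : ¬ r < t + 1 := by omega
          simp [hlt, h2']
    · rw [h2 (t : Int) (by positivity)]

-- counting facts for the closed-form rank functions
theorem ebf_zero (n : Int) : ebf n 0 0 = 0 := by
  simp [ebf]

theorem obf_zero (n : Int) : obf n 0 0 = 0 := by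
  simp [obf]

theorem ebf_step (n i j : Int) (_hi : 0 ≤ i) (_hj : 0 ≤ j) :
    ebf n i (j + 1) = ebf n i j + (if (PySem.Int.mod (i + j) 2 == 0) then 1 else 0) := by
  unfold ebf
  rw [PySem.Int.mod_eq_emod_of_pos (by norm_num)]
  generalize (i * n : Int) = a
  by_cases h : (i + j) % 2 = 0
  · rw [if_pos (by simp [h])]
    omega
  · rw [if_neg (by simp [h])]
    omega

theorem obf_step (n i j : Int) (_hi : 0 ≤ i) (_hj : 0 ≤ j) :
    obf n i (j + 1) = obf n i j + (if (!(PySem.Int.mod (i + j) 2 == 0)) then 1 else 0) := by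
  unfold obf
  rw [PySem.Int.mod_eq_emod_of_pos (by norm_num)]
  generalize (i * n : Int) = a
  by_cases h : (i + j) % 2 = 0
  · rw [if_neg (by simp [h])]
    omega
  · rw [if_pos (by simp [h])]
    omega

theorem ebf_wrap (n i : Int) (_hi : 0 ≤ i) : ebf n (i + 1) 0 = ebf n i n := by
  unfold ebf
  have hmul : (i + 1) * n = i * n + n := by ring
  rw [hmul]
  have hk := Int.mul_emod i n 2
  generalize hA : (i * n : Int) = a at hk ⊢
  rcases Int.emod_two_eq i with h | h <;> rcases Int.emod_two_eq n with h' | h' <;>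
    rw [h, h'] at hk <;> norm_num at hk <;> omega

theorem obf_wrap (n i : Int) (_hi : 0 ≤ i) : obf n (i + 1) 0 = obf n i n := by
  unfold obf
  have hmul : (i + 1) * n = i * n + n := by ring
  rw [hmul]
  have hk := Int.mul_emod i n 2
  generalize hA : (i * n : Int) = a at hk ⊢
  rcases Int.emod_two_eq i with h | h <;> rcases Int.emod_two_eq n with h' | h' <;>
    rw [h, h'] at hk <;> norm_num at hk <;> omega

-- after the two passes, cell (r, j) holds exactly the closed-form value pvVal
theorem cell_eq (m r j : Nat) (hr : r < m) (_hj : j < m) :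
    (if r < m ∧ (!(PySem.Int.mod ((r : Int) + (j : Int)) 2 == 0)) = true then
        (1 + ebf (m : Int) (m : Int) 0) + obf (m : Int) (r : Int) (j : Int)
      else if r < m ∧ (PySem.Int.mod ((r : Int) + (j : Int)) 2 == 0) = true then
        1 + ebf (m : Int) (r : Int) (j : Int)
      else 0)
      = pvVal (m : Int) (r : Int) (j : Int) := by
  unfold pvVal ebf obf
  rw [PySem.Int.mod_eq_emod_of_pos (show (0:Int) < 2 by norm_num),
    PySem.Int.mod_eq_emod_of_pos (show (0:Int) < 2 by norm_num),
    PySem.Int.floordiv_eq_ediv_of_pos (show (0:Int) < 2 by norm_num),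
    PySem.Int.floordiv_eq_ediv_of_pos (show (0:Int) < 2 by norm_num),
    PySem.Int.floordiv_eq_ediv_of_pos (show (0:Int) < 2 by norm_num),
    PySem.Int.floordiv_eq_ediv_of_pos (show (0:Int) < 2 by norm_num),
    PySem.Int.floordiv_eq_ediv_of_pos (show (0:Int) < 2 by norm_num)]
  simp only [hr, true_and, beq_iff_eq]
  by_cases hp : ((r : Int) + (j : Int)) % 2 = 0
  · simp only [hp]
    norm_num
    generalize ((r : Int) * (m : Int)) = a
    omega
  · simp only [hp]
    norm_num
    generalize ((r : Int) * (m : Int)) = a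
    generalize ((m : Int) * (m : Int)) = b
    omega

theorem create_beautiful_matrix_eq_alt (n : Int) :
    create_beautiful_matrix n = create_beautiful_matrix_alt n := by
  by_cases hneg : n ≤ 0
  · have h0 : n.toNat = 0 := by omega
    simp [create_beautiful_matrix, create_beautiful_matrix_alt,
      PySem.List.pyRange_one_eq_nil hneg, h0]
  · have hn : 0 ≤ n := by omega
    have hmn : ((n.toNat : Nat) : Int) = n := Int.toNat_of_nonneg hn
    unfold create_beautiful_matrix create_beautiful_matrix_alt
    rw [← hmn]
    have hrep : List.replicate n.toNat (List.replicate n.toNat (0 : Int)) =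
        (List.range n.toNat).map (fun r => (List.range n.toNat).map (fun _ => (0 : Int))) := by
      simp [List.map_const']
    simp only [Int.toNat_natCast, hrep]
    have e1 : ∀ i : Int, (fun (st : List (List Int) × Int) (j : Int) =>
        if PySem.Int.mod (i + j) 2 == 0 then (pySet2 st.1 i j st.2, st.2 + 1) else st)
        = mbody (fun i j => PySem.Int.mod (i + j) 2 == 0) i := fun _ => rfl
    have e2 : ∀ i : Int, (fun (st : List (List Int) × Int) (j : Int) =>
        if !(PySem.Int.mod (i + j) 2 == 0) then (pySet2 st.1 i j st.2, st.2 + 1) else st)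
        = mbody (fun i j => !(PySem.Int.mod (i + j) 2 == 0)) i := fun _ => rfl
    simp only [e1, e2]
    rw [outer_pass (fun i j => PySem.Int.mod (i + j) 2 == 0) (ebf ((n.toNat : Nat) : Int)) n.toNat
      (ebf_zero _) (fun i j hi hj => ebf_step _ i j hi hj) (fun i hi => ebf_wrap _ i hi)
      n.toNat (le_refl _) (fun _ _ => 0) 1]
    rw [outer_pass (fun i j => !(PySem.Int.mod (i + j) 2 == 0)) (obf ((n.toNat : Nat) : Int)) n.toNat
      (obf_zero _) (fun i j hi hj => obf_step _ i j hi hj) (fun i hi => obf_wrap _ i hi)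
      n.toNat (le_refl _) _ _]
    rw [PySem.List.pyRange_one 0 ((n.toNat : Nat) : Int)]
    simp only [sub_zero, Int.toNat_natCast, List.map_map, zero_add, Function.comp_def]
    apply map_range_congr
    intro r hr
    apply map_range_congr
    intro j hj
    exact cell_eq n.toNat r j hr hj

-- ===== VERDICT (by name: the statement is the Claim_ definition above) =====
theorem create_beautiful_matrix_spec : Claim_equal_create_beautiful_matrix := by
  intro n _
  unfold Spec_create_beautiful_matrix
  exact create_beautiful_matrix_eq_alt n
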